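-- pv_equiv track=rewrite | github.com/jwlai-cloud/document-translation | src/services/upload_service.py | _has_suspicious_filename
-- ===== SOURCE A (Python) =====
-- def _has_suspicious_filename(filename: str) -> bool:
--     """Check if filename contains suspicious patterns."""
--     suspicious_patterns = [
--         '..',  # Directory traversal
--         '/',   # Path separator
--         '\\',  # Windows path separator
--         ':',   # Drive separator (Windows)
--         '<',   # HTML/XML
--         '>',   # HTML/XML
--         '|',   # Pipe
--         '*',   # Wildcard
--         '?',   # Wildcard
--     ]
--
--     return any(pattern in filename for pattern in suspicious_patterns)
-- ===== SOURCE B (Python) =====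
-- def _has_suspicious_filename(filename: str) -> bool:
--     """Check if filename contains suspicious patterns (single stateful scan)."""
--     forbidden = {'/', '\\', ':', '<', '>', '|', '*', '?'}
--     prev = ''
--     for ch in filename:
--         if ch in forbidden:
--             return True
--         if ch == '.' and prev == '.':
--             return True
--         prev = ch
--     return False
-- ===== Notes on version B (the rewrite author's own statement) =====
-- stated objective: alternative
-- what changed: Replaced nine independent substring searches (any(pattern in filename ...)) by one stateful left-to-right scan that flags any forbidden character immediately and detects the double-dot traversal pattern via the previous character.
import Mathlib
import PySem

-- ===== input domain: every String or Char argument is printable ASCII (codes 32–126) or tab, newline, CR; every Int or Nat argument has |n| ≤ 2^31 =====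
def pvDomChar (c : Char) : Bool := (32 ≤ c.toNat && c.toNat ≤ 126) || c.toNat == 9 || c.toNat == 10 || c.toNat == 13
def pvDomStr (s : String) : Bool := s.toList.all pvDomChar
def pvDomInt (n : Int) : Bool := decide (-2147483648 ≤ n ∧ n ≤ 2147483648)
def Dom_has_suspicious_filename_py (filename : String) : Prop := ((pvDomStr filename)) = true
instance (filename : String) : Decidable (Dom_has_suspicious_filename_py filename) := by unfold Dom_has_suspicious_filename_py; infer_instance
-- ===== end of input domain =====

-- B replaces A's nine independent substring searches by one stateful left-to-right
-- scan (forbidden-char set + previous-character check for '..'); objective: alternative.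


-- ===== PORT A =====
-- A: any(pattern in filename for pattern in suspicious_patterns)
def has_suspicious_filename_py (filename : String) : Bool :=
  [ "..", "/", "\\", ":", "<", ">", "|", "*", "?" ].any
    (fun pattern => PySem.Str.isIn pattern filename)

-- ===== PORT B =====
-- B-side helper: membership in the forbidden-character set
def pvForbidden (c : Char) : Bool :=
  PySem.Set.contains (PySem.Set.ofList ['/', '\\', ':', '<', '>', '|', '*', '?']) c

-- the for-loop of Source B: scan with the previous character as state ('' at start → none)
def pvScan (prev : Option Char) : List Char → Bool
  | [] => false
  | c :: rest =>
      if pvForbidden c then true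
      else if c = '.' ∧ prev = some '.' then true
      else pvScan (some c) rest

def has_suspicious_filename_py_alt (filename : String) : Bool :=
  pvScan none filename.toList

-- ===== PRECONDITION & SPEC =====
def Spec_has_suspicious_filename_py (filename : String) (out : Bool) : Prop := out = has_suspicious_filename_py_alt filename
instance (filename : String) (out : Bool) : Decidable (Spec_has_suspicious_filename_py filename out) := by unfold Spec_has_suspicious_filename_py; infer_instance

-- ===== CLAIM (what is proved, stated in full; the proofs are below) =====
def Claim_equal_has_suspicious_filename_py : Prop := ∀ (filename : String), Dom_has_suspicious_filename_py filename → Spec_has_suspicious_filename_py filename (has_suspicious_filename_py filename)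

-- ===== LEMMAS AND PROOFS =====

-- adjacent-dot detector (reference form of the '..' case)
def pvDD : List Char → Bool
  | '.' :: '.' :: _ => true
  | _ :: rest => pvDD rest
  | [] => false

-- head-is-dot helper
def pvHD : List Char → Bool
  | '.' :: _ => true
  | _ => false

theorem pvDD_cons (c : Char) (l : List Char) :
    pvDD (c :: l) = ((decide (c = '.') && pvHD l) || pvDD l) := by
  cases l with
  | nil => by_cases hc : c = '.' <;> simp [pvDD, pvHD, hc]
  | cons d t =>
      by_cases hc : c = '.' <;> by_cases hd : d = '.' <;> simp_all [pvDD, pvHD]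

-- the scan computes: (prev was '.' and head is '.') or (some forbidden char) or (adjacent dots)
theorem pvHD_cons (c : Char) (l : List Char) : pvHD (c :: l) = decide (c = '.') := by
  by_cases hc : c = '.' <;> simp [pvHD, hc]

theorem pvScan_eq (l : List Char) : ∀ (prev : Option Char),
    pvScan prev l =
      ((decide (prev = some '.') && pvHD l) || (l.any pvForbidden || pvDD l)) := by
  induction l with
  | nil => intro prev; simp [pvScan, pvHD, pvDD]

  | cons c rest ih =>
      intro prev
      by_cases hf : pvForbidden c
      · simp [pvScan, hf]
      · by_cases hc : c = '.'
        · subst hc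
          by_cases hp : prev = some '.' <;>
            simp [pvScan, hf, hp, ih (some '.'), pvDD_cons, pvHD_cons, Bool.or_assoc,
                  Bool.or_comm, Bool.or_left_comm]
        · by_cases hp : prev = some '.' <;>
            simp [pvScan, hf, hc, hp, ih (some c), pvDD_cons, pvHD_cons, Bool.or_assoc,
                  Bool.or_comm, Bool.or_left_comm]

-- singleton infix is membership
theorem singleton_infix_iff (a : Char) (l : List Char) : [a] <:+: l ↔ a ∈ l := by
  constructor
  · intro h; exact List.singleton_sublist.mp h.sublist
  · intro h
    obtain ⟨s, t, rfl⟩ := List.append_of_mem h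
    exact ⟨s, t, by simp⟩

-- '..' is an infix iff there are adjacent dots
theorem dd_infix_iff (l : List Char) : ['.', '.'] <:+: l ↔ pvDD l = true := by
  induction l with
  | nil => simp [pvDD]
  | cons c rest ih =>
      rw [pvDD_cons]
      constructor
      · intro h
        rcases h with ⟨s, t, hst⟩
        cases s with
        | nil =>
            cases rest with
            | nil => simp at hst
            | cons d t' =>
                simp at hst
                obtain ⟨h1, h2, _⟩ := hst
                simp [← h1, ← h2, pvHD]
        | cons x s' =>
            have hrest : ['.', '.'] <:+: rest := by
              refine ⟨s', t, ?_⟩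
              simpa using congrArg List.tail hst
            simp [ih.mp hrest]
      · intro h
        rcases Bool.or_eq_true_iff.mp h with h1 | h2
        · obtain ⟨hc, hd⟩ := Bool.and_eq_true_iff.mp h1
          cases rest with
          | nil => simp [pvHD] at hd
          | cons d t' =>
              have hd' : d = '.' := by
                by_cases hdd : d = '.'
                · exact hdd
                · simp [pvHD, hdd] at hd
              exact ⟨[], t', by simp [of_decide_eq_true hc, hd']⟩
        · exact (ih.mpr h2).trans (rest.suffix_cons c).isInfix

-- A's value in terms of membership and adjacent dots
theorem portA_eq (filename : String) :
    has_suspicious_filename_py filename =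
      (filename.toList.any pvForbidden || pvDD filename.toList) := by
  rw [Bool.eq_iff_iff]
  simp only [has_suspicious_filename_py, List.any_eq_true, Bool.or_eq_true]
  constructor
  · rintro ⟨p, hp, hin⟩
    have hinf := (PySem.Str.isIn_iff_infix _ _).mp hin
    fin_cases hp
    · exact Or.inr ((dd_infix_iff _).mp hinf)
    all_goals
      exact Or.inl ⟨_, (singleton_infix_iff _ _).mp hinf, by decide⟩
  · rintro (⟨c, hc, hfc⟩ | hdd)
    · have hmem : c ∈ ['/', '\\', ':', '<', '>', '|', '*', '?'] := by
        unfold pvForbidden at hfc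
        rw [PySem.Set.contains_iff] at hfc
        simpa [PySem.Set.mem_ofList] using hfc
      fin_cases hmem
      · exact ⟨"/", by simp, (PySem.Str.isIn_iff_infix _ _).mpr
          (by simpa using (singleton_infix_iff _ _).mpr hc)⟩
      · exact ⟨"\\", by simp, (PySem.Str.isIn_iff_infix _ _).mpr
          (by simpa using (singleton_infix_iff _ _).mpr hc)⟩
      · exact ⟨":", by simp, (PySem.Str.isIn_iff_infix _ _).mpr
          (by simpa using (singleton_infix_iff _ _).mpr hc)⟩
      · exact ⟨"<", by simp, (PySem.Str.isIn_iff_infix _ _).mpr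
          (by simpa using (singleton_infix_iff _ _).mpr hc)⟩
      · exact ⟨">", by simp, (PySem.Str.isIn_iff_infix _ _).mpr
          (by simpa using (singleton_infix_iff _ _).mpr hc)⟩
      · exact ⟨"|", by simp, (PySem.Str.isIn_iff_infix _ _).mpr
          (by simpa using (singleton_infix_iff _ _).mpr hc)⟩
      · exact ⟨"*", by simp, (PySem.Str.isIn_iff_infix _ _).mpr
          (by simpa using (singleton_infix_iff _ _).mpr hc)⟩
      · exact ⟨"?", by simp, (PySem.Str.isIn_iff_infix _ _).mpr
          (by simpa using (singleton_infix_iff _ _).mpr hc)⟩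
    · exact ⟨"..", by simp, (PySem.Str.isIn_iff_infix _ _).mpr ((dd_infix_iff _).mpr hdd)⟩

-- ===== VERDICT (by name: the statement is the Claim_ definition above) =====
theorem has_suspicious_filename_py_spec : Claim_equal_has_suspicious_filename_py := by
  intro filename _
  unfold Spec_has_suspicious_filename_py has_suspicious_filename_py_alt
  rw [portA_eq, pvScan_eq]
  simp
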